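-- pv_equiv track=rewrite | github.com/jhg3410/Algorithm | 프로그래머스/3/152995. 인사고과/인사고과.py | solution
-- ===== SOURCE A (Python) =====
-- LIMIT = 100_000
--
-- def solution(scores):
--     max_score2 = [0 for _ in range(LIMIT+1)]
--     for score1, score2 in scores:
--         if score2 > max_score2[score1]:
--             max_score2[score1] = score2
--
--     # 얘가 기준: 해당 idx 일 때 value 보다 크거나 같으면 인센티브를 받는다.
--     min_score2 = [0 for _ in range(LIMIT+1)]
--     behind_max = 0
--     for i in range(LIMIT, -1, -1):
--         min_score2[i] = behind_max
--         behind_max = max(behind_max, max_score2[i])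
--
--     live_scores = []
--     for score1, score2 in scores[1:]:
--         if score2 >= min_score2[score1]:
--             live_scores.append(score1 + score2)
--
--     if scores[0][1] < min_score2[scores[0][0]]:
--         return -1
--
--     stand = sum(scores[0])
--     answer = 0
--     for score in live_scores:
--         if score > stand:
--             answer += 1
--     return answer + 1
-- ===== SOURCE B (Python) =====
-- def solution(scores):
--     n = len(scores)
--     order = sorted(range(n), key=lambda i: (-scores[i][0], scores[i][1]))
--     dominated = [False] * n
--     running = 0
--     for i in order:
--         s2 = scores[i][1]
--         if s2 < running:
--             dominated[i] = True
--         elif s2 > running: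
--             running = s2
--     if dominated[0]:
--         return -1
--     stand = scores[0][0] + scores[0][1]
--     count = 0
--     for i in range(1, n):
--         if not dominated[i] and scores[i][0] + scores[i][1] > stand:
--             count += 1
--     return count + 1
-- ===== Notes on version B (the rewrite author's own statement) =====
-- stated objective: faster
-- what changed: Replaces A's two fixed 100001-entry tables (a per-score1 max table plus a full backward suffix-max sweep over the whole score range) by sorting the indices once by (score1 desc, score2 asc) and marking dominated employees in a single running-max sweep over the n employees, so the work depends on n instead of the 100000-wide score range.
-- outside the precondition, e.g. on solution([(5, 1), (-1, 9)]): A returns -1, B returns 2; on solution([]): A raises IndexError, B raises IndexError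
import Mathlib
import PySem

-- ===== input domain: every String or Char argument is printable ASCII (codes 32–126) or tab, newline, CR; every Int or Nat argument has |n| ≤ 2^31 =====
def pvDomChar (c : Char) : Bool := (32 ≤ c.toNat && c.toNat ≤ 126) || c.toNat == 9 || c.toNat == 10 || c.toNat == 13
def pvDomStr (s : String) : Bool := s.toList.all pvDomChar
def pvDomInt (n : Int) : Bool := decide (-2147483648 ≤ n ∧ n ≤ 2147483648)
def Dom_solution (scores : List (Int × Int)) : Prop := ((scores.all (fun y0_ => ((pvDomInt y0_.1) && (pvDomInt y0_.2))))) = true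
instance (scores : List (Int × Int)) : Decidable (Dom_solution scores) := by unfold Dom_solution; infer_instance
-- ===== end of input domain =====

-- B replaces A's two fixed 100001-entry score tables by one sort of the n indices
-- (score1 desc, score2 asc) and a single running-max sweep, so the work depends on n
-- rather than on the fixed 100000-wide score range.

-- ===== PORT A =====
-- Python list index resolution (negative index counts from the end); exact for -len ≤ i < len,
-- Python raises IndexError outside that range (those inputs are outside Pre_solution).
def pvAIdx (len : Nat) (i : Int) : Int := if i < 0 then i + len else i
-- a[i] read (0 default where Python would raise; unreached under Pre_solution)
def pvAGet (a : Array Int) (i : Int) : Int := (a[(pvAIdx a.size i).toNat]?).getD 0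
-- a[i] = v write (no-op where Python would raise; unreached under Pre_solution)
def pvASet (a : Array Int) (i : Int) (v : Int) : Array Int := a.setIfInBounds (pvAIdx a.size i).toNat v
-- body of A's first loop: if score2 > max_score2[score1]: max_score2[score1] = score2
def pvAStep1 (a : Array Int) (p : Int × Int) : Array Int := if p.2 > pvAGet a p.1 then pvASet a p.1 p.2 else a
-- body of A's countdown loop: min_score2[i] = behind_max; behind_max = max(behind_max, max_score2[i])
def pvAStep2 (c : Array Int) (st : Array Int × Int) (i : Int) : Array Int × Int :=
  (pvASet st.1 i st.2, max st.2 (pvAGet c i))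

def solution (scores : List (Int × Int)) : Int :=
  let max2 : Array Int := scores.foldl pvAStep1 (Array.replicate 100001 0)
  let loop2 := (PySem.List.pyRange 100000 (-1) (-1)).foldl (pvAStep2 max2) (Array.replicate 100001 0, 0)
  let min2 := loop2.1
  let live : List Int := (PySem.List.slice scores (some 1) none).foldl
    (fun acc p => if p.2 ≥ pvAGet min2 p.1 then acc ++ [p.1 + p.2] else acc) []
  let fst0 := (PySem.List.pyGet? scores 0).getD (0, 0)   -- scores[0]; none = IndexError, excluded by Pre_
  if fst0.2 < pvAGet min2 fst0.1 then -1
  else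
    let stand := fst0.1 + fst0.2
    let answer := live.foldl (fun acc s => if s > stand then acc + 1 else acc) (0 : Int)
    answer + 1

-- ===== PORT B =====
-- body of B's sweep: if s2 < running: dominated[i] = True; elif s2 > running: running = s2
def pvBStep (f : Int → Int) (st : List Bool × Int) (i : Int) : List Bool × Int :=
  if f i < st.2 then (PySem.List.pySetD st.1 i true, st.2)
  else if f i > st.2 then (st.1, f i)
  else st

def solution_alt (scores : List (Int × Int)) : Int :=
  let n : Int := (scores.length : Int)
  let sAt : Int → Int × Int := fun i => PySem.List.pyGetD scores i (0, 0)
  let order := PySem.List.sorted2 (PySem.List.pyRange 0 n 1) (fun i => -(sAt i).1) (fun i => (sAt i).2)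
  let sw := order.foldl (pvBStep (fun i => (sAt i).2)) (List.replicate scores.length false, 0)
  let dominated := sw.1
  if PySem.List.pyGetD dominated 0 false then -1   -- dominated[0]; IndexError on empty input, excluded by Pre_
  else
    let stand := (sAt 0).1 + (sAt 0).2
    let count := (PySem.List.pyRange 1 n 1).foldl
      (fun acc i => if !(PySem.List.pyGetD dominated i false) && decide ((sAt i).1 + (sAt i).2 > stand)
                    then acc + 1 else acc) (0 : Int)
    count + 1

-- ===== PRECONDITION & SPEC =====
-- Pre_ excludes the empty list (scores[0] raises IndexError) and inputs with a score1 outside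
-- [0, 100000]: above 100000 (or below -100001) A raises IndexError on its fixed-size tables, and
-- for score1 in [-100001, -1] A returns a value only through Python's negative-index wraparound
-- into those tables, an accident of the implementation that B does not reproduce.
def Pre_solution (scores : List (Int × Int)) : Prop :=
  scores ≠ [] ∧ ∀ p ∈ scores, 0 ≤ p.1 ∧ p.1 ≤ 100000
instance (scores : List (Int × Int)) : Decidable (Pre_solution scores) := by unfold Pre_solution; infer_instance

def pvWitness_solution : (List (Int × Int)) := [(1, 2), (3, 4), (0, 0)]

def Spec_solution (scores : List (Int × Int)) (out : Int) : Prop := out = solution_alt scores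
instance (scores : List (Int × Int)) (out : Int) : Decidable (Spec_solution scores out) := by unfold Spec_solution; infer_instance

-- ===== CLAIM (what is proved, stated in full; the proofs are below) =====
def Claim_equal_solution : Prop := ∀ (scores : List (Int × Int)), Dom_solution scores → Pre_solution scores → Spec_solution scores (solution scores)

-- ===== LEMMAS AND PROOFS =====

theorem pv_size_pvASet (a : Array Int) (i v : Int) : (pvASet a i v).size = a.size := by
  simp [pvASet]

theorem pvAGet_pvASet (a : Array Int) (i j v : Int) (hi : 0 ≤ i) (hj : 0 ≤ j) :
    pvAGet (pvASet a i v) j = if i = j ∧ i.toNat < a.size then v else pvAGet a j := by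
  simp only [pvAGet, pvASet, pvAIdx, Array.size_setIfInBounds, if_neg (by omega : ¬ i < 0),
    if_neg (by omega : ¬ j < 0), Array.getElem?_setIfInBounds]
  by_cases hij : i = j
  · subst hij
    by_cases hlt : i.toNat < a.size <;> simp [hlt]
  · rw [if_neg (by omega), if_neg (by simp; omega)]

theorem pvAGet_replicate (n : Nat) (j : Int) : pvAGet (Array.replicate n (0:Int)) j = 0 := by
  simp only [pvAGet, Array.getElem?_replicate, Array.size_replicate]
  split <;> simp

theorem pv_max2_char (l : List (Int × Int)) (a : Array Int) (ha : a.size = 100001)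
    (hb : ∀ p ∈ l, 0 ≤ p.1 ∧ p.1 ≤ 100000) (j : Int) (hj0 : 0 ≤ j) (hj1 : j ≤ 100000) :
    pvAGet (l.foldl pvAStep1 a) j = l.foldl (fun m p => if p.1 = j ∧ p.2 > m then p.2 else m) (pvAGet a j) := by
  induction l generalizing a with
  | nil => rfl
  | cons p t ih =>
    obtain ⟨hp0, hp1⟩ := hb p (List.mem_cons_self ..)
    have hb' : ∀ q ∈ t, 0 ≤ q.1 ∧ q.1 ≤ 100000 := fun q hq => hb q (List.mem_cons_of_mem _ hq)
    simp only [List.foldl_cons]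
    have hsz : (pvAStep1 a p).size = 100001 := by
      simp only [pvAStep1]; split <;> simp [pv_size_pvASet, ha]
    rw [ih _ hsz hb']
    congr 1
    simp only [pvAStep1]
    by_cases hc : p.2 > pvAGet a p.1
    · rw [if_pos hc, pvAGet_pvASet _ _ _ _ hp0 hj0]
      by_cases hij : p.1 = j
      · subst hij
        rw [if_pos ⟨rfl, by omega⟩, if_pos ⟨rfl, hc⟩]
      · rw [if_neg (by tauto), if_neg (by tauto)]
    · rw [if_neg hc]
      by_cases hij : p.1 = j
      · subst hij
        rw [if_neg (by tauto)]
      · rw [if_neg (by tauto)]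

theorem pv_foldl_max_seed {α : Type} (f : α → Int) (L : List α) (b v : Int) :
    L.foldl (fun m t => max m (f t)) (max b v) = max (L.foldl (fun m t => max m (f t)) b) v := by
  induction L generalizing b with
  | nil => rfl
  | cons a t ih =>
    simp only [List.foldl_cons]
    rw [show max (max b v) (f a) = max (max b (f a)) v by omega, ih]

theorem pv_loop2_char (c : Array Int) (k : Nat) (mn : Array Int) (b : Int)
    (hsz : mn.size = 100001) (hk : k ≤ 100001) :
    (∀ j : Int, 0 ≤ j → j ≤ 100000 →
      pvAGet ((PySem.List.pyRange ((k : Int) - 1) (-1) (-1)).foldl (pvAStep2 c) (mn, b)).1 j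
        = if j < (k : Int) then (PySem.List.pyRange (j + 1) (k : Int)).foldl (fun m t => max m (pvAGet c t)) b
          else pvAGet mn j)
    ∧ ((PySem.List.pyRange ((k : Int) - 1) (-1) (-1)).foldl (pvAStep2 c) (mn, b)).2
        = (PySem.List.pyRange 0 (k : Int)).foldl (fun m t => max m (pvAGet c t)) b := by
  induction k generalizing mn b with
  | zero =>
    rw [PySem.List.pyRange_neg_one_eq_nil (by omega)]
    refine ⟨fun j hj0 _ => ?_, ?_⟩
    · simp only [List.foldl_nil]
      rw [if_neg (by omega)]
    · simp only [List.foldl_nil]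
      rw [PySem.List.pyRange_one_eq_nil (by omega)]
      rfl
  | succ k ih =>
    have e1 : ((k + 1 : Nat) : Int) - 1 = (k : Int) := by push_cast; ring
    have e2 : ((k + 1 : Nat) : Int) = (k : Int) + 1 := by push_cast; ring
    rw [e1, PySem.List.pyRange_neg_one_cons (by omega : (-1 : Int) < (k : Int))]
    simp only [List.foldl_cons]
    have hstep : pvAStep2 c (mn, b) (k : Int) = (pvASet mn (k : Int) b, max b (pvAGet c (k : Int))) := rfl
    have hsz' : (pvASet mn (k : Int) b).size = 100001 := by rw [pv_size_pvASet, hsz]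
    obtain ⟨ihg, ihs⟩ := ih (pvASet mn (k : Int) b) (max b (pvAGet c (k : Int))) hsz' (by omega)
    constructor
    · intro j hj0 hj1
      rw [hstep, ihg j hj0 hj1]
      by_cases hjk : j < (k : Int)
      · rw [if_pos hjk, if_pos (by omega), e2,
          PySem.List.pyRange_one_succ_right (by omega : j + 1 ≤ (k : Int)), List.foldl_append]
        simp only [List.foldl_cons, List.foldl_nil]
        rw [← pv_foldl_max_seed]
      · rw [if_neg hjk]
        by_cases hjk1 : j < (k : Int) + 1
        · have hjeq : j = (k : Int) := by omega
          subst hjeq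
          rw [if_pos (by omega), pvAGet_pvASet _ _ _ _ hj0 hj0, if_pos ⟨rfl, by omega⟩, e2,
            PySem.List.pyRange_one_eq_nil (le_refl _)]
          rfl
        · rw [if_neg (by omega), pvAGet_pvASet _ _ _ _ (by omega) hj0, if_neg (by omega)]
    · rw [hstep, ihs, e2, PySem.List.pyRange_one_succ_right (by omega : (0 : Int) ≤ (k : Int)),
        List.foldl_append]
      simp only [List.foldl_cons, List.foldl_nil]
      rw [← pv_foldl_max_seed]

def pvThr (scores : List (Int × Int)) (x : Int) : Int :=
  (scores.filter (fun p => decide (x < p.1))).foldl (fun m p => max m p.2) 0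

def pvMx (scores : List (Int × Int)) (j : Int) : Int :=
  scores.foldl (fun m p => if p.1 = j ∧ p.2 > m then p.2 else m) 0

theorem pv_foldl_max_attain {α : Type} (f : α → Int) (L : List α) (b : Int) :
    L.foldl (fun m t => max m (f t)) b = b ∨ ∃ t ∈ L, L.foldl (fun m t => max m (f t)) b = f t := by
  induction L generalizing b with
  | nil => exact Or.inl rfl
  | cons a t ih =>
    simp only [List.foldl_cons]
    rcases ih (max b (f a)) with h | ⟨u, hu, he⟩
    · rcases max_cases b (f a) with ⟨he, _⟩ | ⟨he, _⟩
      · exact Or.inl (h.trans he)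
      · exact Or.inr ⟨a, List.mem_cons_self .., h.trans he⟩
    · exact Or.inr ⟨u, List.mem_cons_of_mem _ hu, he⟩

theorem pv_lt_foldl_max_iff {α : Type} (f : α → Int) (L : List α) (s : Int) :
    s < L.foldl (fun m t => max m (f t)) 0 ↔ s < 0 ∨ ∃ t ∈ L, s < f t := by
  obtain ⟨h0, hub⟩ := PySem.List.le_foldl_max_int L f 0
  constructor
  · intro hl
    rcases pv_foldl_max_attain f L 0 with he | ⟨u, hu, he⟩
    · left; omega
    · right; exact ⟨u, hu, by omega⟩
  · rintro (h | ⟨t, ht, hs⟩)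
    · omega
    · have := hub t ht; omega

theorem pv_lt_foldl_max_snd_iff (L : List (Int × Int)) (s : Int) :
    s < L.foldl (fun m p => max m p.2) 0 ↔ s < 0 ∨ ∃ p ∈ L, s < p.2 :=
  pv_lt_foldl_max_iff (fun p => p.2) L s

theorem pvMx_lt_iff (scores : List (Int × Int)) (j s : Int) :
    s < pvMx scores j ↔ s < 0 ∨ ∃ p ∈ scores, p.1 = j ∧ s < p.2 := by
  unfold pvMx
  rw [PySem.List.foldl_congr_mem' scores _ (fun m p => if p.1 = j then max m p.2 else m) 0
      (by intro p _ m; dsimp only; split_ifs <;> omega)]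
  rw [PySem.List.foldl_ite_eq_foldl_filter (fun p : Int × Int => p.1 = j) (fun m p => max m p.2)]
  rw [pv_lt_foldl_max_snd_iff]
  simp [List.mem_filter, and_assoc]

theorem pvThr_lt_iff (scores : List (Int × Int)) (x s : Int) :
    s < pvThr scores x ↔ s < 0 ∨ ∃ p ∈ scores, x < p.1 ∧ s < p.2 := by
  unfold pvThr
  rw [pv_lt_foldl_max_snd_iff]
  simp [List.mem_filter, and_assoc]

theorem pvRng_eq_thr (scores : List (Int × Int)) (x : Int)
    (hb : ∀ p ∈ scores, 0 ≤ p.1 ∧ p.1 ≤ 100000) :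
    (PySem.List.pyRange (x + 1) 100001).foldl (fun m t => max m (pvMx scores t)) 0 = pvThr scores x := by
  have key : ∀ s : Int, s < (PySem.List.pyRange (x + 1) 100001).foldl (fun m t => max m (pvMx scores t)) 0
      ↔ s < pvThr scores x := by
    intro s
    rw [pv_lt_foldl_max_iff (fun t => pvMx scores t), pvThr_lt_iff]
    constructor
    · rintro (h | ⟨t, ht, hs⟩)
      · exact Or.inl h
      · rw [pvMx_lt_iff] at hs
        rcases hs with h | ⟨p, hp, hpt, hsp⟩
        · exact Or.inl h
        · rw [PySem.List.mem_pyRange_one] at ht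
          exact Or.inr ⟨p, hp, by omega, hsp⟩
    · rintro (h | ⟨p, hp, hpx, hsp⟩)
      · exact Or.inl h
      · refine Or.inr ⟨p.1, ?_, ?_⟩
        · rw [PySem.List.mem_pyRange_one]
          have := hb p hp; omega
        · rw [pvMx_lt_iff]
          exact Or.inr ⟨p, hp, rfl, hsp⟩
  rcases lt_trichotomy ((PySem.List.pyRange (x + 1) 100001).foldl (fun m t => max m (pvMx scores t)) 0)
      (pvThr scores x) with h | h | h
  · exact absurd ((key _).2 h) (lt_irrefl _)
  · exact h
  · exact absurd ((key _).1 h) (lt_irrefl _)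

def pvRef (scores : List (Int × Int)) : Int :=
  match scores with
  | [] => 0
  | q :: rest =>
    if q.2 < pvThr scores q.1 then -1
    else (rest.countP (fun p => decide (¬ (p.2 < pvThr scores p.1) ∧ q.1 + q.2 < p.1 + p.2)) : Int) + 1

theorem pvA_eq_ref (scores : List (Int × Int)) (h : Pre_solution scores) : solution scores = pvRef scores := by
  obtain ⟨hne, hb⟩ := h
  obtain ⟨q, rest, rfl⟩ := List.exists_cons_of_ne_nil hne
  have hq := hb q (List.mem_cons_self ..)
  -- the max_score2 table
  have hmax2 : ∀ t : Int, 0 ≤ t → t ≤ 100000 →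
      pvAGet ((q :: rest).foldl pvAStep1 (Array.replicate 100001 0)) t = pvMx (q :: rest) t := by
    intro t ht0 ht1
    rw [pv_max2_char _ _ (by simp) hb t ht0 ht1, pvAGet_replicate]
    rfl
  -- the min_score2 table
  have hmin2 : ∀ j : Int, 0 ≤ j → j ≤ 100000 →
      pvAGet ((PySem.List.pyRange 100000 (-1) (-1)).foldl
          (pvAStep2 ((q :: rest).foldl pvAStep1 (Array.replicate 100001 0)))
          (Array.replicate 100001 0, 0)).1 j = pvThr (q :: rest) j := by
    intro j hj0 hj1
    have hr : ((100001 : Nat) : Int) - 1 = (100000 : Int) := by norm_num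
    obtain ⟨hg, -⟩ := pv_loop2_char ((q :: rest).foldl pvAStep1 (Array.replicate 100001 0)) 100001
      (Array.replicate 100001 0) 0 (by simp) (le_refl _)
    rw [hr] at hg
    rw [hg j hj0 hj1, if_pos (by norm_num; omega)]
    rw [PySem.List.foldl_congr_mem' _ _ (fun m t => max m (pvMx (q :: rest) t)) 0 ?_]
    · have : ((100001 : Nat) : Int) = (100001 : Int) := by norm_num
      rw [this, pvRng_eq_thr _ _ hb]
    · intro t ht m
      rw [PySem.List.mem_pyRange_one] at ht
      dsimp only
      rw [hmax2 t (by omega) (by norm_num at ht; omega)]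
  simp only [solution, PySem.List.pyGet?_zero_cons, Option.getD_some]
  rw [hmin2 q.1 hq.1 hq.2]
  have hsl : PySem.List.slice (q :: rest) (some (1 : Int)) none = rest := by
    rw [PySem.List.slice_from _ (by omega)]
    rfl
  rw [hsl,
    PySem.List.foldl_congr_mem' rest _
      (fun acc p => if p.2 ≥ pvThr (q :: rest) p.1 then acc ++ [p.1 + p.2] else acc) []
      (by
        intro p hp acc
        have hpb := hb p (List.mem_cons_of_mem _ hp)
        dsimp only
        rw [hmin2 p.1 hpb.1 hpb.2]),
    PySem.List.foldl_append_ite (fun p : Int × Int => p.2 ≥ pvThr (q :: rest) p.1) (fun p => p.1 + p.2),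
    List.nil_append,
    PySem.List.foldl_ite_add_one (fun s : Int => s > q.1 + q.2),
    List.countP_map, List.countP_filter]
  simp only [pvRef]
  split_ifs with hc
  · rfl
  · rw [List.countP_congr (q := fun p => decide (¬ (p.2 < pvThr (q :: rest) p.1) ∧ q.1 + q.2 < p.1 + p.2)) ?_]
    · omega
    · intro p hp
      simp only [Function.comp, decide_eq_true_eq, Bool.and_eq_true, ge_iff_le, gt_iff_lt]
      omega

theorem pv_insertBy_pairwise {α : Type} (before : α → α → Bool)
    (htr : ∀ a b c, before a b = true → before b c = true → before a c = true)
    (hirr : ∀ a, before a a = false) (x : α) (ys : List α)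
    (h : ys.Pairwise (fun a b => before b a = false)) :
    (PySem.List.insertBy before x ys).Pairwise (fun a b => before b a = false) := by
  induction ys with
  | nil => simp [PySem.List.insertBy]
  | cons y t ih =>
    rw [PySem.List.insertBy]
    rw [List.pairwise_cons] at h
    by_cases hc : before x y = true
    · rw [if_pos hc]
      refine List.pairwise_cons.2 ⟨?_, List.pairwise_cons.2 ⟨h.1, h.2⟩⟩
      intro z hz
      rcases List.mem_cons.1 hz with rfl | hz'
      · by_cases hyx : before z x = true
        · exact absurd (htr _ _ _ hc hyx) (by simp [hirr])
        · simpa using hyx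
      · have hzy := h.1 z hz'
        by_cases hzx : before z x = true
        · exact absurd (htr _ _ _ hzx hc) (by simp [hzy])
        · simpa using hzx
    · rw [if_neg hc]
      refine List.pairwise_cons.2 ⟨?_, ih h.2⟩
      intro z hz
      rcases (PySem.List.mem_insertBy before x z t).1 hz with rfl | hz'
      · simpa using hc
      · exact h.1 z hz'

theorem pv_foldl_insertBy_pairwise {α : Type} (before : α → α → Bool)
    (htr : ∀ a b c, before a b = true → before b c = true → before a c = true)
    (hirr : ∀ a, before a a = false) (xs : List α) (acc : List α)
    (h : acc.Pairwise (fun a b => before b a = false)) :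
    (xs.foldl (fun acc x => PySem.List.insertBy before x acc) acc).Pairwise
      (fun a b => before b a = false) := by
  induction xs generalizing acc with
  | nil => exact h
  | cons x t ih =>
    exact ih _ (pv_insertBy_pairwise before htr hirr x acc h)

theorem pv_sorted2_pairwise (xs : List Int) (k1 k2 : Int → Int) :
    (PySem.List.sorted2 xs k1 k2).Pairwise
      (fun a b => k1 a < k1 b ∨ (k1 a = k1 b ∧ k2 a ≤ k2 b)) := by
  have hp : (PySem.List.sorted2 xs k1 k2).Pairwise
      (fun a b => (decide (k1 b < k1 a) || (!decide (k1 a < k1 b) && decide (k2 b < k2 a))) = false) := by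
    show (xs.foldl (fun acc x => PySem.List.insertBy
        (fun a b => decide (k1 a < k1 b) || (!decide (k1 b < k1 a) && decide (k2 a < k2 b))) x acc) []).Pairwise _
    exact pv_foldl_insertBy_pairwise _
      (by intro a b c h1 h2; simp only [Bool.or_eq_true, Bool.and_eq_true, Bool.not_eq_true',
            decide_eq_true_eq, decide_eq_false_iff_not] at *; omega)
      (by intro a; simp)
      xs [] List.Pairwise.nil
  refine hp.imp ?_
  intro a b h
  simp only [Bool.or_eq_false_iff, Bool.and_eq_false_iff, Bool.not_eq_false',
    decide_eq_false_iff_not, decide_eq_true_eq] at h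
  omega

theorem pvB_set_getD (d : List Bool) (i : Int) (j : Nat) (hi : 0 ≤ i) :
    (PySem.List.pySetD d i true).getD j false
      = if i.toNat = j ∧ j < d.length then true else d.getD j false := by
  rw [PySem.List.pySetD_of_nonneg _ _ hi]
  simp only [List.getD_eq_getElem?_getD, List.getElem?_set]
  by_cases h1 : i.toNat = j
  · subst h1
    by_cases h2 : i.toNat < d.length
    · simp [h2]
    · simp [h2]
  · simp [h1]

theorem pvB_sweep_untouched (f : Int → Int) (L : List Int) (st : List Bool × Int) (i : Int)
    (hi : 0 ≤ i) (hL : ∀ j ∈ L, 0 ≤ j ∧ j ≠ i) :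
    (L.foldl (pvBStep f) st).1.getD i.toNat false = st.1.getD i.toNat false := by
  induction L generalizing st with
  | nil => rfl
  | cons a t ih =>
    obtain ⟨ha0, hai⟩ := hL a (List.mem_cons_self ..)
    simp only [List.foldl_cons]
    rw [ih _ (fun j hj => hL j (List.mem_cons_of_mem _ hj))]
    simp only [pvBStep]
    split_ifs with h1 h2
    · rw [pvB_set_getD _ _ _ ha0, if_neg (by omega)]
    · rfl
    · rfl

theorem pvB_sweep_get (f : Int → Int) (L : List Int) (d : List Bool) (r : Int) (i : Int)
    (hnd : L.Nodup) (hL : ∀ j ∈ L, 0 ≤ j ∧ j.toNat < d.length) (hi : i ∈ L)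
    (hd : d.getD i.toNat false = false) :
    ((L.foldl (pvBStep f) (d, r)).1).getD i.toNat false
      = decide (f i < r ∨ ∃ j ∈ L.takeWhile (fun j => decide (j ≠ i)), f i < f j) := by
  induction L generalizing d r with
  | nil => cases hi
  | cons a t ih =>
    obtain ⟨ha0, hal⟩ := hL a (List.mem_cons_self ..)
    have hstep : pvBStep f (d, r) a
        = ((if f a < r then PySem.List.pySetD d a true else d), max r (f a)) := by
      simp only [pvBStep]
      split_ifs <;> simp <;> omega
    rw [List.nodup_cons] at hnd
    simp only [List.foldl_cons, hstep]
    rcases List.mem_cons.1 hi with rfl | hit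
    · -- i is the head; the rest of the sweep never writes index i again
      rw [List.takeWhile_cons_of_neg (by simp)]
      rw [pvB_sweep_untouched f t _ i ha0
        (fun j hj => ⟨(hL j (List.mem_cons_of_mem _ hj)).1, fun he => hnd.1 (he ▸ hj)⟩)]
      split_ifs with hc
      · rw [pvB_set_getD _ _ _ ha0, if_pos ⟨rfl, hal⟩]
        simp [hc]
      · rw [hd]
        simp [hc]
    · -- i is in the tail
      have hia : i ≠ a := fun he => hnd.1 (he ▸ hit)
      rw [List.takeWhile_cons_of_pos (by simp [Ne.symm hia])]
      have hd' : (if f a < r then PySem.List.pySetD d a true else d).getD i.toNat false = false := by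
        split_ifs with hc
        · rw [pvB_set_getD _ _ _ ha0, if_neg ?_, hd]
          have h0i := (hL i hi).1
          intro ⟨he, _⟩
          exact hia (by omega)
        · exact hd
      have hlen : ∀ j ∈ t, 0 ≤ j ∧ j.toNat < (if f a < r then PySem.List.pySetD d a true else d).length := by
        intro j hj
        have := hL j (List.mem_cons_of_mem _ hj)
        split_ifs <;> simpa [PySem.List.length_pySetD] using this
      rw [ih _ _ hnd.2 hlen hit hd']
      have : (f i < max r (f a) ∨ ∃ j ∈ t.takeWhile (fun j => decide (j ≠ i)), f i < f j)
          ↔ (f i < r ∨ ∃ j ∈ a :: t.takeWhile (fun j => decide (j ≠ i)), f i < f j) := by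
        constructor
        · rintro (h | ⟨j, hj, hfj⟩)
          · rcases max_cases r (f a) with ⟨he, _⟩ | ⟨he, _⟩
            · exact Or.inl (by omega)
            · by_cases hfr : f i < r
              · exact Or.inl hfr
              · exact Or.inr ⟨a, List.mem_cons_self .., by omega⟩
          · exact Or.inr ⟨j, List.mem_cons_of_mem _ hj, hfj⟩
        · rintro (h | ⟨j, hj, hfj⟩)
          · exact Or.inl (by rcases max_cases r (f a) with ⟨he, _⟩ | ⟨he, _⟩ <;> omega)
          · rcases List.mem_cons.1 hj with rfl | hj'
            · exact Or.inl (by rcases max_cases r (f j) with ⟨he, _⟩ | ⟨he, _⟩ <;> omega)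
            · exact Or.inr ⟨j, hj', hfj⟩
      simp only [this]

theorem pvB_pref_iff (L : List Int) (g f : Int → Int) (i : Int)
    (hpw : L.Pairwise (fun a b => g b < g a ∨ (g a = g b ∧ f a ≤ f b))) (hi : i ∈ L) :
    (∃ j ∈ L.takeWhile (fun j => decide (j ≠ i)), f i < f j) ↔ ∃ j ∈ L, g i < g j ∧ f i < f j := by
  have hsplit : L.takeWhile (fun j => decide (j ≠ i)) ++ L.dropWhile (fun j => decide (j ≠ i)) = L :=
    List.takeWhile_append_dropWhile
  have hitw : i ∉ L.takeWhile (fun j => decide (j ≠ i)) := by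
    intro hmem
    have := List.mem_takeWhile_imp hmem
    simp at this
  have hidw : i ∈ L.dropWhile (fun j => decide (j ≠ i)) := by
    have := hsplit ▸ hi
    rcases List.mem_append.1 (hsplit.symm ▸ hi) with h | h
    · exact absurd h hitw
    · exact h
  have hdne : L.dropWhile (fun j => decide (j ≠ i)) ≠ [] := List.ne_nil_of_mem hidw
  have hhead : (L.dropWhile (fun j => decide (j ≠ i))).head hdne = i := by
    have := List.head_dropWhile_not (fun j => decide (j ≠ i)) hdne
    simpa using this
  have hdw : L.dropWhile (fun j => decide (j ≠ i))
      = i :: (L.dropWhile (fun j => decide (j ≠ i))).tail := by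
    have h2 := (List.cons_head_tail hdne).symm
    rwa [hhead] at h2
  have hpw2 : (L.takeWhile (fun j => decide (j ≠ i))
      ++ i :: (L.dropWhile (fun j => decide (j ≠ i))).tail).Pairwise
      (fun a b => g b < g a ∨ (g a = g b ∧ f a ≤ f b)) := by
    rw [← hdw, hsplit]; exact hpw
  obtain ⟨hptw, hpdw, hcross⟩ := List.pairwise_append.1 hpw2
  constructor
  · rintro ⟨j, hjtw, hfj⟩
    refine ⟨j, hsplit ▸ List.mem_append_left _ hjtw, ?_, hfj⟩
    rcases hcross j hjtw i (List.mem_cons_self ..) with h | ⟨he, hle⟩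
    · exact h
    · omega
  · rintro ⟨j, hjL, hgt, hfj⟩
    refine ⟨j, ?_, hfj⟩
    rcases List.mem_append.1 (hsplit.symm ▸ hjL) with h | h
    · exact h
    · rw [hdw] at h
      rcases List.mem_cons.1 h with rfl | h'
      · omega
      · rcases List.pairwise_cons.1 hpdw with ⟨hrel, -⟩
        rcases hrel j h' with hlt | ⟨he, -⟩ <;> omega

theorem pv_pyGetD_nonneg {α : Type} (xs : List α) (i : Int) (d : α) (h : 0 ≤ i) :
    PySem.List.pyGetD xs i d = xs.getD i.toNat d := by
  by_cases hlt : i < (xs.length : Int)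
  · rw [PySem.List.pyGetD_eq_getElem xs d h hlt, List.getD_eq_getElem?_getD,
      List.getElem?_eq_getElem (by omega), Option.getD_some]
  · rw [List.getD_eq_getElem?_getD, List.getElem?_eq_none (by omega), Option.getD_none]
    show (PySem.List.pyGet? xs i).getD d = d
    rw [(PySem.List.pyGet?_eq_none_iff xs i).2 (by simp [PySem.Raise.InRange]; omega), Option.getD_none]

theorem pvB_eq_ref (scores : List (Int × Int)) (h : Pre_solution scores) :
    solution_alt scores = pvRef scores := by
  obtain ⟨hne, -⟩ := h
  obtain ⟨q, rest, rfl⟩ := List.exists_cons_of_ne_nil hne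
  have hdom : ∀ i : Int, 0 ≤ i → i < ((q :: rest).length : Int) →
      ((PySem.List.sorted2 (PySem.List.pyRange 0 ((q :: rest).length : Int))
            (fun i => -(PySem.List.pyGetD (q :: rest) i (0, 0)).1)
            (fun i => (PySem.List.pyGetD (q :: rest) i (0, 0)).2)).foldl
          (pvBStep (fun i => (PySem.List.pyGetD (q :: rest) i (0, 0)).2))
          (List.replicate (q :: rest).length false, 0)).1.getD i.toNat false
        = decide ((PySem.List.pyGetD (q :: rest) i (0, 0)).2
            < pvThr (q :: rest) (PySem.List.pyGetD (q :: rest) i (0, 0)).1) := by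
    intro i hi0 hin
    have hperm := PySem.List.sorted2_perm (PySem.List.pyRange 0 ((q :: rest).length : Int))
      (fun i => -(PySem.List.pyGetD (q :: rest) i (0, 0)).1)
      (fun i => (PySem.List.pyGetD (q :: rest) i (0, 0)).2) false
    have hmemL : ∀ j : Int, j ∈ PySem.List.sorted2 (PySem.List.pyRange 0 ((q :: rest).length : Int))
        (fun i => -(PySem.List.pyGetD (q :: rest) i (0, 0)).1)
        (fun i => (PySem.List.pyGetD (q :: rest) i (0, 0)).2) ↔ 0 ≤ j ∧ j < ((q :: rest).length : Int) := by
      intro j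
      rw [hperm.mem_iff, PySem.List.mem_pyRange_one]
    have hndL := hperm.symm.nodup (PySem.List.nodup_pyRange_one _ _)
    rw [pvB_sweep_get _ _ _ 0 i hndL
      (fun j hj => ⟨((hmemL j).1 hj).1, by
        have := (hmemL j).1 hj
        simp only [List.length_replicate]
        omega⟩)
      ((hmemL i).2 ⟨hi0, hin⟩) (by simp)]
    rw [decide_eq_decide, pvThr_lt_iff]
    have hpw := (pv_sorted2_pairwise (PySem.List.pyRange 0 ((q :: rest).length : Int))
        (fun i => -(PySem.List.pyGetD (q :: rest) i (0, 0)).1)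
        (fun i => (PySem.List.pyGetD (q :: rest) i (0, 0)).2)).imp
      (S := fun a b => (PySem.List.pyGetD (q :: rest) b (0, 0)).1 < (PySem.List.pyGetD (q :: rest) a (0, 0)).1
        ∨ ((PySem.List.pyGetD (q :: rest) a (0, 0)).1 = (PySem.List.pyGetD (q :: rest) b (0, 0)).1
           ∧ (PySem.List.pyGetD (q :: rest) a (0, 0)).2 ≤ (PySem.List.pyGetD (q :: rest) b (0, 0)).2))
      (fun hab => by omega)
    rw [pvB_pref_iff _ (fun j => (PySem.List.pyGetD (q :: rest) j (0, 0)).1)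
      (fun j => (PySem.List.pyGetD (q :: rest) j (0, 0)).2) i hpw ((hmemL i).2 ⟨hi0, hin⟩)]
    constructor
    · rintro (hlt | ⟨j, hjL, hgt, hfj⟩)
      · exact Or.inl hlt
      · obtain ⟨hj0, hjn⟩ := (hmemL j).1 hjL
        rw [PySem.List.pyGetD_eq_getElem _ _ hj0 hjn] at hgt hfj
        exact Or.inr ⟨_, List.getElem_mem _, hgt, hfj⟩
    · rintro (hlt | ⟨p, hp, hgt, hfp⟩)
      · exact Or.inl hlt
      · obtain ⟨m, hm, rfl⟩ := List.mem_iff_getElem.1 hp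
        have hsm : PySem.List.pyGetD (q :: rest) (m : Int) (0, 0) = (q :: rest)[m] := by
          rw [PySem.List.pyGetD_eq_getElem _ _ (by omega) (by omega)]
          simp
        refine Or.inr ⟨(m : Int), (hmemL _).2 ⟨by omega, by omega⟩, ?_, ?_⟩ <;> rw [hsm]
        · exact hgt
        · exact hfp
  -- assembly
  simp only [solution_alt]
  rw [pv_pyGetD_nonneg _ 0 false (by omega), hdom 0 (by omega) (by simp)]
  simp only [PySem.List.pyGetD_zero_cons]
  simp only [pvRef, decide_eq_true_eq]
  split_ifs with hc
  · rfl
  · congr 1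
    rw [PySem.List.foldl_congr_mem' _ _
      (fun acc i => if ¬ ((PySem.List.pyGetD (q :: rest) i (0, 0)).2
            < pvThr (q :: rest) (PySem.List.pyGetD (q :: rest) i (0, 0)).1)
          ∧ q.1 + q.2 < (PySem.List.pyGetD (q :: rest) i (0, 0)).1 + (PySem.List.pyGetD (q :: rest) i (0, 0)).2
        then acc + 1 else acc) 0 ?_]
    · rw [PySem.List.foldl_pyRange_pyGetD' (q :: rest) (0, 0)
        (fun acc p => if ¬ (p.2 < pvThr (q :: rest) p.1) ∧ q.1 + q.2 < p.1 + p.2 then acc + 1 else acc)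
        0 (by omega)]
      have hdrop : List.drop (Int.toNat 1) (q :: rest) = rest := rfl
      rw [hdrop, PySem.List.foldl_ite_add_one
        (fun p : Int × Int => ¬ (p.2 < pvThr (q :: rest) p.1) ∧ q.1 + q.2 < p.1 + p.2)]
      omega
    · intro i hi acc
      rw [PySem.List.mem_pyRange_one] at hi
      dsimp only
      rw [pv_pyGetD_nonneg _ i false (by omega), hdom i (by omega) hi.2]
      by_cases h1 : (PySem.List.pyGetD (q :: rest) i (0, 0)).2
          < pvThr (q :: rest) (PySem.List.pyGetD (q :: rest) i (0, 0)).1 <;>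
        by_cases h2 : q.1 + q.2 < (PySem.List.pyGetD (q :: rest) i (0, 0)).1 + (PySem.List.pyGetD (q :: rest) i (0, 0)).2 <;>
        simp [h1, h2]

-- ===== VERDICT (by name: the statement is the Claim_ definition above) =====
theorem solution_spec : Claim_equal_solution := by
  intro scores _ hpre
  unfold Spec_solution
  rw [pvA_eq_ref scores hpre, pvB_eq_ref scores hpre]
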